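-- pv_equiv track=rewrite | github.com/anhbkpro/leetcode | interview/anz/r1_cust_share_acct.py | sharedAccounts
-- ===== SOURCE A (Python) =====
-- from collections import defaultdict
--
-- def sharedAccounts(customerAccounts):
--     # Build customer -> accounts mapping
--     cust_to_acct = defaultdict(set)
--     for cust, acct in customerAccounts:
--         cust_to_acct[cust].add(acct)
--
--     # Group customers by their account sets using frozenset as key
--     account_groups = defaultdict(list)
--     for cust, accounts in cust_to_acct.items():
--         key = frozenset(accounts)
--         account_groups[key].append(cust)
--
--     # Collect groups with multiple customers and sort
--     result = []
--     for _, customers in account_groups.items():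
--         if len(customers) > 1:
--             result.append(sorted(customers))
--
--     return sorted(result)
-- ===== SOURCE B (Python) =====
-- from collections import defaultdict
--
-- def sharedAccounts(customerAccounts):
--     # Build customer -> accounts mapping
--     cust_to_acct = defaultdict(set)
--     for cust, acct in customerAccounts:
--         cust_to_acct[cust].add(acct)
--
--     # Sort-then-scan grouping: signature = sorted tuple of the account set.
--     pairs = sorted((tuple(sorted(accts)), cust) for cust, accts in cust_to_acct.items())
--     res = []
--     i, n = 0, len(pairs)
--     while i < n:
--         j = i
--         while j < n and pairs[j][0] == pairs[i][0]:
--             j += 1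
--         if j - i > 1:
--             res.append([cust for _, cust in pairs[i:j]])
--         i = j
--     return sorted(res)
-- ===== Notes on version B (the rewrite author's own statement) =====
-- stated objective: alternative
-- what changed: Grouping customers by equal account sets is done by sorting (signature, customer) pairs and scanning consecutive equal-signature runs with a two-index loop, instead of A's hash grouping via a dict keyed by frozenset.
import Mathlib
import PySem

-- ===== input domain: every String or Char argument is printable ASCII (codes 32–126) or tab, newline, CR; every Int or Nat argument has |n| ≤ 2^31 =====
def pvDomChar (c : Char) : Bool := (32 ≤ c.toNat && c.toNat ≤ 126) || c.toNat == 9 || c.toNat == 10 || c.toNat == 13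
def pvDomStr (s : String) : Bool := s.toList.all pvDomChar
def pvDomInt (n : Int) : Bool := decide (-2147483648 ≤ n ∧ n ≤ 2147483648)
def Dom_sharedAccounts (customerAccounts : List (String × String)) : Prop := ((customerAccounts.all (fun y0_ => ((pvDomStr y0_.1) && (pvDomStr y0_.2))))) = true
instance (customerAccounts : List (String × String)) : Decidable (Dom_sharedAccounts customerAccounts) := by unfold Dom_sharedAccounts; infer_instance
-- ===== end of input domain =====

-- B replaces A's hash-based grouping (dict keyed by frozenset) with sort-then-scan grouping
-- (sorted signature pairs, one scan over consecutive equal-signature runs); objective: alternative.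

-- ===== PORT A =====
-- hand port of 'account_groups[frozenset(accounts)].append(cust)': a dict keyed by frozenset is an
-- association list whose key equality is set equality (PySem.Set.equal); a new key appends at the end.
-- Exact because the loop only looks keys up by equality and the result is order-independent after sorting.
def pvAgAppend (g : List (PySem.Set String × List String)) (k : PySem.Set String) (c : String) :
    List (PySem.Set String × List String) :=
  match g with
  | [] => [(k, [c])]
  | (k', cs) :: t => if PySem.Set.equal k' k then (k', cs ++ [c]) :: t else (k', cs) :: pvAgAppend t k c

def sharedAccounts (customerAccounts : List (String × String)) : List (List String) :=
  let custToAcct := customerAccounts.foldl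
    (fun d p => d.modify p.1 [] (fun s => PySem.Set.add s p.2)) PySem.Dict.empty
  let accountGroups := custToAcct.items.foldl (fun g p => pvAgAppend g p.2 p.1) []
  let result := accountGroups.foldl
    (fun r q => if 1 < q.2.length then r ++ [PySem.List.sorted q.2 (fun x => x) false] else r) []
  PySem.List.sorted result (fun x => x) false

-- ===== PORT B =====
-- hand port of B's two-index while loop over the sorted pairs: peel off the maximal run of the head's
-- signature (takeWhile/dropWhile = the inner 'while pairs[j][0] == pairs[i][0]: j += 1'); exact step for step.
def pvCollectRuns (l : List (List String × String)) : List (List String) :=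
  match l with
  | [] => []
  | (k, c) :: rest =>
    let run := rest.takeWhile (fun q => q.1 == k)
    let rest' := rest.dropWhile (fun q => q.1 == k)
    if 0 < run.length then (c :: run.map (fun q => q.2)) :: pvCollectRuns rest'
    else pvCollectRuns rest'
termination_by l.length
decreasing_by all_goals
  simp only [List.length_cons]
  exact Nat.lt_succ_of_le (List.length_dropWhile_le _ _)

def sharedAccounts_alt (customerAccounts : List (String × String)) : List (List String) :=
  let custToAcct := customerAccounts.foldl
    (fun d p => d.modify p.1 [] (fun s => PySem.Set.add s p.2)) PySem.Dict.empty
  let pairs := custToAcct.items.map (fun p => (PySem.List.sorted p.2 (fun x => x) false, p.1))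
  let spairs := PySem.List.sorted2 pairs (fun q => q.1) (fun q => q.2) false
  PySem.List.sorted (pvCollectRuns spairs) (fun x => x) false

-- ===== PRECONDITION & SPEC =====
def Spec_sharedAccounts (customerAccounts : List (String × String)) (out : List (List String)) : Prop := out = sharedAccounts_alt customerAccounts
instance (customerAccounts : List (String × String)) (out : List (List String)) : Decidable (Spec_sharedAccounts customerAccounts out) := by unfold Spec_sharedAccounts; infer_instance

-- ===== CLAIM (what is proved, stated in full; the proofs are below) =====
def Claim_equal_sharedAccounts : Prop := ∀ (customerAccounts : List (String × String)), Dom_sharedAccounts customerAccounts → Spec_sharedAccounts customerAccounts (sharedAccounts customerAccounts)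

-- ===== LEMMAS AND PROOFS =====

-- proof-only helpers
def pvSig (s : List String) : List String := PySem.List.sorted s (fun x => x) false

def pvSigP (q : PySem.Set String × List String) : List String × List String := (pvSig q.1, q.2)

-- pure association-list append keyed by plain list equality (the sig image of pvAgAppend)
def pvAssocApp (g : List (List String × List String)) (t : List String) (c : String) :
    List (List String × List String) :=
  match g with
  | [] => [(t, [c])]
  | (t', cs) :: g' => if t' = t then (t', cs ++ [c]) :: g' else (t', cs) :: pvAssocApp g' t c

def pvMem (L : List (List String × String)) (t : List String) : List String :=
  (L.filter (fun q => q.1 == t)).map (fun q => q.2)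

def pvR (a b : List String × String) : Prop := a.1 < b.1 ∨ (a.1 = b.1 ∧ a.2 ≤ b.2)

theorem pvBridgeLO {α κ : Type} [LO : LinearOrder κ] {i1 : LT κ} (i2 : @DecidableLT κ i1)
    (h : i1 = LO.toLT) (xs : List α) (k : α → κ) (r : Bool) :
    @PySem.List.sorted α κ i1 i2 xs k r
      = @PySem.List.sorted α κ LO.toLT LO.toDecidableLT xs k r := by
  subst h; congr 1

theorem pvEqual_iff_sig (s t : List String) (hs : s.Nodup) (ht : t.Nodup) :
    (PySem.Set.equal s t = true) ↔ pvSig s = pvSig t := by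
  rw [PySem.Set.equal_iff]
  unfold pvSig
  rw [pvBridgeLO _ rfl, pvBridgeLO _ rfl, PySem.List.sorted_id_eq_sorted_id_iff_perm]
  exact (List.perm_ext_iff_of_nodup hs ht).symm

theorem pvGetD_nodup (l : List (String × String)) (d : PySem.Dict String (PySem.Set String))
    (hd : ∀ k, (d.getD k []).Nodup) (k : String) :
    ((l.foldl (fun d p => d.modify p.1 [] (fun s => PySem.Set.add s p.2)) d).getD k []).Nodup := by
  induction l generalizing d with
  | nil => exact hd k
  | cons p l ih =>
    simp only [List.foldl_cons]
    apply ih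
    intro k'
    rw [PySem.Dict.getD_modify]
    split_ifs with h
    · exact PySem.Set.nodup_add _ _ (hd p.1)
    · exact hd k'

theorem pvItems_values_nodup (l : List (String × String)) :
    ∀ p ∈ (l.foldl (fun d p => d.modify p.1 [] (fun s => PySem.Set.add s p.2))
        (PySem.Dict.empty : PySem.Dict String (PySem.Set String))).items, p.2.Nodup := by
  intro p hp
  have hk : (l.foldl (fun d p => d.modify p.1 [] (fun s => PySem.Set.add s p.2))
      (PySem.Dict.empty : PySem.Dict String (PySem.Set String))).keys.Nodup := by
    exact PySem.Dict.nodup_keys_foldl_modify_key l (fun p => p.1) []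
      (fun d p => fun s => PySem.Set.add s p.2) _ PySem.Dict.nodup_keys_empty
  have := PySem.Dict.getD_of_mem_items _ (show (p.1, p.2) ∈ _ from hp) hk ([] : PySem.Set String)
  rw [← this]
  apply pvGetD_nodup
  intro k; rw [PySem.Dict.getD_empty]; exact List.nodup_nil

theorem pvAgAppend_map (G : List (PySem.Set String × List String)) (s : PySem.Set String) (c : String)
    (hs : s.Nodup) (hG : ∀ g ∈ G, g.1.Nodup) :
    (pvAgAppend G s c).map pvSigP = pvAssocApp (G.map pvSigP) (pvSig s) c := by
  induction G with
  | nil => simp [pvAgAppend, pvAssocApp, pvSigP]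
  | cons g G ih =>
    obtain ⟨k', cs⟩ := g
    have hk' : k'.Nodup := hG _ (List.mem_cons_self ..)
    simp only [pvAgAppend, List.map_cons, pvSigP, pvAssocApp]
    by_cases h : PySem.Set.equal k' s = true
    · have he : pvSig k' = pvSig s := (pvEqual_iff_sig _ _ hk' hs).mp h
      rw [if_pos h, if_pos he]
      simp [pvSigP]
    · have he : ¬ pvSig k' = pvSig s := fun hh => h ((pvEqual_iff_sig _ _ hk' hs).mpr hh)
      rw [if_neg (by simpa using h), if_neg he]
      simp only [List.map_cons, pvSigP]
      rw [ih (fun g hg => hG g (List.mem_cons_of_mem _ hg))]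

theorem pvAgAppend_keys (G : List (PySem.Set String × List String)) (s : PySem.Set String) (c : String)
    (hs : s.Nodup) (hG : ∀ g ∈ G, g.1.Nodup) :
    ∀ g ∈ pvAgAppend G s c, g.1.Nodup := by
  induction G with
  | nil => intro g hg; simp [pvAgAppend] at hg; subst hg; exact hs
  | cons g0 G ih =>
    obtain ⟨k', cs⟩ := g0
    intro g hg
    simp only [pvAgAppend] at hg
    split_ifs at hg with h
    · rcases List.mem_cons.mp hg with h1 | h1
      · rw [h1]; exact hG (k', cs) (List.mem_cons_self ..)
      · exact hG _ (List.mem_cons_of_mem _ h1)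
    · rcases List.mem_cons.mp hg with h1 | h1
      · rw [h1]; exact hG (k', cs) (List.mem_cons_self ..)
      · exact ih (fun g hg => hG g (List.mem_cons_of_mem _ hg)) g h1

theorem pvLiftA (l : List (String × PySem.Set String)) (G : List (PySem.Set String × List String))
    (hl : ∀ p ∈ l, p.2.Nodup) (hG : ∀ g ∈ G, g.1.Nodup) :
    (l.foldl (fun g p => pvAgAppend g p.2 p.1) G).map pvSigP
      = (l.map (fun p => (pvSig p.2, p.1))).foldl (fun g q => pvAssocApp g q.1 q.2) (G.map pvSigP) := by
  induction l generalizing G with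
  | nil => simp
  | cons p l ih =>
    simp only [List.foldl_cons, List.map_cons]
    have hp : p.2.Nodup := hl p (List.mem_cons_self ..)
    rw [ih _ (fun q hq => hl q (List.mem_cons_of_mem _ hq)) (pvAgAppend_keys G p.2 p.1 hp hG),
      pvAgAppend_map G p.2 p.1 hp hG]

theorem pvAssocApp_map_mem (K : List (List String)) (v : List String → List String)
    (t : List String) (c : String) (hK : K.Nodup) (ht : t ∈ K) :
    pvAssocApp (K.map (fun u => (u, v u))) t c
      = K.map (fun u => (u, v u ++ if u == t then [c] else [])) := by
  induction K with
  | nil => simp at ht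
  | cons u K ih =>
    simp only [List.map_cons, pvAssocApp]
    by_cases h : u = t
    · subst h
      rw [if_pos rfl]
      congr 1
      · simp
      · symm
        apply List.map_congr_left
        intro x hx
        have hx' : ¬ (x == u) = true := by
          intro hxu
          exact (List.nodup_cons.mp hK).1 (eq_of_beq hxu ▸ hx)
        simp [hx']
    · rw [if_neg h,
        ih (List.nodup_cons.mp hK).2 ((List.mem_cons.mp ht).resolve_left (fun e => h e.symm))]
      have hb : (u == t) = false := beq_eq_false_iff_ne.mpr h
      simp [hb]

theorem pvAssocApp_map_not_mem (K : List (List String)) (v : List String → List String)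
    (t : List String) (c : String) (ht : t ∉ K) :
    pvAssocApp (K.map (fun u => (u, v u))) t c
      = K.map (fun u => (u, v u)) ++ [(t, [c])] := by
  induction K with
  | nil => simp [pvAssocApp]
  | cons u K ih =>
    simp only [List.map_cons, pvAssocApp]
    have hu : ¬ u = t := fun h => ht (h ▸ List.mem_cons_self ..)
    rw [if_neg hu, ih (fun h => ht (List.mem_cons_of_mem _ h))]
    simp

theorem pvAssocChar (l : List (List String × String)) :
    l.foldl (fun g q => pvAssocApp g q.1 q.2) []
      = (PySem.Set.ofList (l.map (fun q => q.1))).map (fun t => (t, pvMem l t)) := by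
  induction l using List.reverseRecOn with
  | nil => simp [pvMem]
  | append_singleton l q ih =>
    rw [List.foldl_append, List.foldl_cons, List.foldl_nil, ih]
    have hofl : PySem.Set.ofList ((l ++ [q]).map (fun q => q.1))
        = PySem.Set.add (PySem.Set.ofList (l.map (fun q => q.1))) q.1 := by
      rw [PySem.Set.ofList_eq_foldl, PySem.Set.ofList_eq_foldl]
      simp [List.foldl_append]
    have hmem : ∀ t, pvMem (l ++ [q]) t = pvMem l t ++ (if q.1 == t then [q.2] else []) := by
      intro t
      unfold pvMem
      rw [List.filter_append, List.map_append]
      congr 1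
      by_cases h : (q.1 == t) = true <;> simp [h]
    by_cases hin : q.1 ∈ PySem.Set.ofList (l.map (fun q => q.1))
    · have hcont : (PySem.Set.ofList (l.map (fun q => q.1))).contains q.1 = true := by
        simp only [PySem.Set.contains, List.contains_eq_mem]
        exact decide_eq_true hin
      rw [hofl]
      unfold PySem.Set.add
      rw [if_pos hcont, pvAssocApp_map_mem _ _ _ _ (PySem.Set.nodup_ofList _) hin]
      apply List.map_congr_left
      intro t htm
      rw [hmem t]
      by_cases he : t = q.1
      · subst he; simp
      · have h1 : (t == q.1) = false := beq_eq_false_iff_ne.mpr he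
        have h2 : (q.1 == t) = false := beq_eq_false_iff_ne.mpr (fun e => he e.symm)
        simp [h1, h2]
    · have hcont : (PySem.Set.ofList (l.map (fun q => q.1))).contains q.1 = false := by
        simp only [PySem.Set.contains, List.contains_eq_mem]
        exact decide_eq_false hin
      rw [hofl]
      unfold PySem.Set.add
      rw [if_neg (by rw [hcont]; simp), pvAssocApp_map_not_mem _ _ _ _ hin, List.map_append]
      congr 1
      · apply List.map_congr_left
        intro t htm
        rw [hmem t]
        have hbe : (q.1 == t) = false := beq_eq_false_iff_ne.mpr (fun e => hin (e ▸ htm))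
        simp [hbe]
      · simp only [List.map_cons, List.map_nil, hmem]
        have hq : pvMem l q.1 = [] := by
          unfold pvMem
          have hfil : l.filter (fun r => r.1 == q.1) = [] := by
            rw [List.filter_eq_nil_iff]
            intro r hr hbe
            have hm : r.1 ∈ List.map (fun q => q.1) l := List.mem_map_of_mem hr
            rw [eq_of_beq hbe] at hm
            exact hin ((PySem.Set.mem_ofList _ _).mpr hm)
          simp [hfil]
        simp [hq]

theorem pvResultA (l : List (String × PySem.Set String)) (hl : ∀ p ∈ l, p.2.Nodup) :
    (l.foldl (fun g p => pvAgAppend g p.2 p.1) []).foldl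
        (fun r q => if 1 < q.2.length then r ++ [PySem.List.sorted q.2 (fun x => x) false] else r) []
      = ((PySem.Set.ofList ((l.map (fun p => (pvSig p.2, p.1))).map (fun q => q.1))).filter
            (fun t => decide (1 < (pvMem (l.map (fun p => (pvSig p.2, p.1))) t).length))).map
          (fun t => pvSig (pvMem (l.map (fun p => (pvSig p.2, p.1))) t)) := by
  have hmap := pvLiftA l [] hl (by simp)
  rw [List.map_nil] at hmap
  rw [pvAssocChar] at hmap
  set P := l.map (fun p => (pvSig p.2, p.1)) with hP
  set G := l.foldl (fun g p => pvAgAppend g p.2 p.1) [] with hGdef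
  rw [PySem.List.foldl_append_ite (fun q => 1 < q.2.length) (fun q => PySem.List.sorted q.2 (fun x => x) false) G []]
  rw [List.nil_append]
  -- push filter/map through the pvSigP image
  have h2 : G.map pvSigP = (PySem.Set.ofList (P.map (fun q => q.1))).map (fun t => (t, pvMem P t)) := hmap
  have hfil : G.filter (fun q => decide (1 < q.2.length))
      = (G.filter (fun q => decide (1 < (pvSigP q).2.length))) := by
    apply List.filter_congr; intro q hq; rfl
  rw [hfil]
  have hcomp : ∀ (M : List (PySem.Set String × List String)),
      (M.filter (fun q => decide (1 < (pvSigP q).2.length))).map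
          (fun q => PySem.List.sorted q.2 (fun x => x) false)
        = ((M.map pvSigP).filter (fun r => decide (1 < r.2.length))).map (fun r => pvSig r.2) := by
    intro M
    rw [List.filter_map, List.map_map]
    rfl
  rw [hcomp, h2, List.filter_map, List.map_map]
  rfl

theorem pvInsertBy_pairwise {α : Type} (before : α → α → Bool) (R : α → α → Prop)
    (hbt : ∀ a b, before a b = true → R a b) (hbf : ∀ a b, before a b = false → R b a)
    (htr : ∀ {a b c}, R a b → R b c → R a c) (x : α) (l : List α) (hl : l.Pairwise R) :
    (PySem.List.insertBy before x l).Pairwise R := by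
  induction l with
  | nil => simp [PySem.List.insertBy]
  | cons y ys ih =>
    rw [List.pairwise_cons] at hl
    simp only [PySem.List.insertBy]
    by_cases h : before x y = true
    · rw [if_pos h]
      refine List.pairwise_cons.mpr ⟨?_, List.pairwise_cons.mpr ⟨hl.1, hl.2⟩⟩
      intro z hz
      rcases List.mem_cons.mp hz with h1 | h1
      · exact h1 ▸ hbt _ _ h
      · exact htr (hbt _ _ h) (hl.1 z h1)
    · rw [if_neg h]
      refine List.pairwise_cons.mpr ⟨?_, ih hl.2⟩
      intro z hz
      rcases (PySem.List.mem_insertBy before x z ys).mp hz with h1 | h1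
      · exact h1 ▸ hbf _ _ (Bool.eq_false_iff.mpr h ▸ rfl)
      · exact hl.1 z h1

theorem pvFoldlInsertBy_pairwise {α : Type} (before : α → α → Bool) (R : α → α → Prop)
    (hbt : ∀ a b, before a b = true → R a b) (hbf : ∀ a b, before a b = false → R b a)
    (htr : ∀ {a b c}, R a b → R b c → R a c) (l : List α) (init : List α) (hinit : init.Pairwise R) :
    (l.foldl (fun acc x => PySem.List.insertBy before x acc) init).Pairwise R := by
  induction l generalizing init with
  | nil => exact hinit
  | cons x l ih =>
    exact ih _ (pvInsertBy_pairwise before R hbt hbf htr x init hinit)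

theorem pvR_trans {a b c : List String × String} (h1 : pvR a b) (h2 : pvR b c) : pvR a c := by
  rcases h1 with h1 | ⟨h1, h1'⟩ <;> rcases h2 with h2 | ⟨h2, h2'⟩
  · exact Or.inl (lt_trans h1 h2)
  · exact Or.inl (h2 ▸ h1)
  · exact Or.inl (h1 ▸ h2)
  · exact Or.inr ⟨h1.trans h2, le_trans h1' h2'⟩

theorem pvSpairs_pairwise (P : List (List String × String)) :
    (PySem.List.sorted2 P (fun q => q.1) (fun q => q.2) false).Pairwise pvR := by
  show (P.foldl (fun acc x => PySem.List.insertBy _ x acc) []).Pairwise pvR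
  apply pvFoldlInsertBy_pairwise _ pvR ?_ ?_ @pvR_trans P [] List.Pairwise.nil
  · intro a b h
    replace h : (decide (a.1 < b.1) || (!decide (b.1 < a.1) && decide (a.2 < b.2))) = true := h
    simp only [Bool.or_eq_true, Bool.and_eq_true, Bool.not_eq_eq_eq_not, Bool.not_true,
      decide_eq_false_iff_not, decide_eq_true_eq] at h
    rcases h with h | ⟨h1, h2⟩
    · exact Or.inl h
    · rcases lt_or_eq_of_le (not_lt.mp h1) with h3 | h3
      · exact Or.inl h3
      · exact Or.inr ⟨h3, le_of_lt h2⟩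
  · intro a b h
    replace h : (decide (a.1 < b.1) || (!decide (b.1 < a.1) && decide (a.2 < b.2))) = false := h
    simp only [Bool.or_eq_false_iff, Bool.and_eq_false_iff, Bool.not_eq_eq_eq_not,
      Bool.not_false, decide_eq_false_iff_not, decide_eq_true_eq] at h
    obtain ⟨h1, h2⟩ := h
    rcases h2 with h2 | h2
    · exact Or.inl h2
    · rcases lt_or_eq_of_le (not_lt.mp h1) with h3 | h3
      · exact Or.inl h3
      · exact Or.inr ⟨h3, not_lt.mp h2⟩

theorem pvDropWhile_head_false {α : Type} (p : α → Bool) (l : List α) (x : α) (xs : List α)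
    (h : l.dropWhile p = x :: xs) : p x = false := by
  have hne : l.dropWhile p ≠ [] := by simp [h]
  have := List.head_dropWhile_not p hne
  rwa [show (l.dropWhile p).head hne = x by rw [List.head_eq_iff_head?_eq_some]; simp [h]] at this

-- keys strictly after the first run are strictly larger

theorem pvRestKeys (k : List String) (c : String) (rest : List (List String × String))
    (hL : ((k, c) :: rest).Pairwise pvR) :
    ∀ q ∈ rest.dropWhile (fun q => q.1 == k), k < q.1 := by
  obtain ⟨hhead, hrest⟩ := List.pairwise_cons.mp hL
  cases hd : rest.dropWhile (fun q => q.1 == k) with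
  | nil => simp
  | cons e es =>
    have he_mem : e ∈ rest := (hd ▸ List.dropWhile_sublist _).mem (List.mem_cons_self ..)
    have hek : e.1 ≠ k := by
      have := pvDropWhile_head_false _ rest e es hd
      simpa using this
    have hke : k < e.1 := by
      rcases hhead e he_mem with h | ⟨h, _⟩
      · exact h
      · exact absurd h.symm hek
    intro q hq
    rcases List.mem_cons.mp hq with h1 | h1
    · exact h1 ▸ hke
    · have hpw' : (e :: es).Pairwise pvR := hd ▸ List.Pairwise.sublist (List.dropWhile_sublist _) hrest
      rcases (List.pairwise_cons.mp hpw').1 q h1 with h | ⟨h, _⟩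
      · exact lt_trans hke h
      · exact h ▸ hke

theorem pvMemHead (k : List String) (c : String) (rest : List (List String × String))
    (hL : ((k, c) :: rest).Pairwise pvR) :
    pvMem ((k, c) :: rest) k = c :: (rest.takeWhile (fun q => q.1 == k)).map (fun q => q.2) := by
  have hfr : rest.filter (fun q => q.1 == k) = rest.takeWhile (fun q => q.1 == k) := by
    conv_lhs => rw [← List.takeWhile_append_dropWhile (p := fun (q : List String × String) => q.1 == k) (l := rest)]
    rw [List.filter_append,
      List.filter_eq_self.mpr (fun q hq => List.mem_takeWhile_imp (p := fun (q : List String × String) => q.1 == k) hq),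
      List.filter_eq_nil_iff.mpr (fun (q : List String × String) hq hbe => by
        have hk := pvRestKeys k c rest hL q hq
        rw [eq_of_beq hbe] at hk
        exact absurd hk (lt_irrefl k))]
    simp
  unfold pvMem
  rw [List.filter_cons]
  simp only [beq_self_eq_true, if_pos, hfr, List.map_cons]

theorem pvMemNe (k t : List String) (c : String) (rest : List (List String × String))
    (_hL : ((k, c) :: rest).Pairwise pvR) (hne : t ≠ k) :
    pvMem ((k, c) :: rest) t = pvMem (rest.dropWhile (fun q => q.1 == k)) t := by
  unfold pvMem
  rw [List.filter_cons]
  rw [if_neg (by simp; exact fun h => hne h.symm)]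
  congr 1
  conv_lhs => rw [← List.takeWhile_append_dropWhile (p := fun (q : List String × String) => q.1 == k) (l := rest)]
  rw [List.filter_append]
  rw [List.filter_eq_nil_iff.mpr (fun (q : List String × String) hq hbe => by
    have h1 := List.mem_takeWhile_imp (p := fun (q : List String × String) => q.1 == k) hq
    exact hne ((eq_of_beq hbe).symm.trans (eq_of_beq h1)))]
  simp

theorem pvKeysSplit (k t : List String) (c : String) (rest : List (List String × String))
    (_hL : ((k, c) :: rest).Pairwise pvR) :
    (t ∈ ((k, c) :: rest).map (fun q => q.1)) ↔
      (t = k ∨ t ∈ (rest.dropWhile (fun q => q.1 == k)).map (fun q => q.1)) := by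
  constructor
  · intro h
    rcases List.mem_cons.mp h with h1 | h1
    · exact Or.inl h1
    · obtain ⟨q, hq, hqe⟩ := List.mem_map.mp h1
      conv at hq => rw [← List.takeWhile_append_dropWhile (p := fun (q : List String × String) => q.1 == k) (l := rest)]
      rcases List.mem_append.mp hq with h2 | h2
      · exact Or.inl (hqe ▸ eq_of_beq (List.mem_takeWhile_imp (p := fun (q : List String × String) => q.1 == k) h2))
      · exact Or.inr (List.mem_map.mpr ⟨q, h2, hqe⟩)
  · intro h
    rcases h with h1 | h1
    · exact h1 ▸ List.mem_cons_self ..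
    · obtain ⟨q, hq, hqe⟩ := List.mem_map.mp h1
      exact List.mem_cons_of_mem _ (List.mem_map.mpr ⟨q, (List.dropWhile_sublist _).mem hq, hqe⟩)

theorem pvCollectRuns_cons (k : List String) (c : String) (rest : List (List String × String)) :
    pvCollectRuns ((k, c) :: rest)
      = if 0 < (rest.takeWhile (fun q => q.1 == k)).length then
          (c :: (rest.takeWhile (fun q => q.1 == k)).map (fun q => q.2))
            :: pvCollectRuns (rest.dropWhile (fun q => q.1 == k))
        else pvCollectRuns (rest.dropWhile (fun q => q.1 == k)) := by
  rw [pvCollectRuns]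

theorem pvCollectRuns_perm (L : List (List String × String)) (hL : L.Pairwise pvR)
    (T : List (List String)) (hT : T.Nodup) (hmem : ∀ t, t ∈ T ↔ t ∈ L.map (fun q => q.1)) :
    (pvCollectRuns L).Perm
      ((T.filter (fun t => decide (1 < (pvMem L t).length))).map (fun t => pvMem L t)) := by
  induction L using pvCollectRuns.induct generalizing T with
  | case1 =>
    have : T = [] := by
      cases T with
      | nil => rfl
      | cons t ts => exact absurd ((hmem t).mp (List.mem_cons_self ..)) (by simp)
    subst this
    simp [pvCollectRuns]
  | case2 k c rest run rest' hrun ih =>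
    have erun : run = rest.takeWhile (fun q => q.1 == k) := rfl
    have erest' : rest' = rest.dropWhile (fun q => q.1 == k) := rfl
    have hrest'pw : (rest.dropWhile (fun q => q.1 == k)).Pairwise pvR :=
      List.Pairwise.sublist (List.dropWhile_sublist _) ((List.pairwise_cons.mp hL).2)
    have hkT : k ∈ T := (hmem k).mpr (by simp)
    have hT' : (T.erase k).Nodup := hT.erase k
    have hmem' : ∀ t, t ∈ T.erase k ↔ t ∈ (rest.dropWhile (fun q => q.1 == k)).map (fun q => q.1) := by
      intro t
      rw [hT.mem_erase_iff]
      constructor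
      · intro ⟨hne, ht⟩
        rcases (pvKeysSplit k t c rest hL).mp ((hmem t).mp ht) with h1 | h1
        · exact absurd h1 hne
        · exact h1
      · intro ht
        obtain ⟨q, hq, hqe⟩ := List.mem_map.mp ht
        have hlt : k < t := hqe ▸ pvRestKeys k c rest hL q hq
        exact ⟨fun he => absurd (he ▸ hlt) (lt_irrefl k),
          (hmem t).mpr ((pvKeysSplit k t c rest hL).mpr (Or.inr ht))⟩
    have hTperm : T.Perm (k :: T.erase k) := List.perm_cons_erase hkT
    have hfiltmap :
        ((T.erase k).filter (fun t => decide (1 < (pvMem ((k, c) :: rest) t).length))).map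
            (fun t => pvMem ((k, c) :: rest) t)
          = ((T.erase k).filter
              (fun t => decide (1 < (pvMem (rest.dropWhile (fun q => q.1 == k)) t).length))).map
            (fun t => pvMem (rest.dropWhile (fun q => q.1 == k)) t) := by
      rw [List.filter_congr (fun t ht => by
        rw [pvMemNe k t c rest hL (hT.mem_erase_iff.mp ht).1])]
      apply List.map_congr_left
      intro t ht
      exact pvMemNe k t c rest hL (hT.mem_erase_iff.mp (List.mem_filter.mp ht).1).1
    have ihx := ih hrest'pw (T.erase k) hT' hmem'
    rw [erun] at hrun
    rw [pvCollectRuns_cons, if_pos hrun]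
    have hPBk : (decide (1 < (pvMem ((k, c) :: rest) k).length)) = true := by
      rw [pvMemHead k c rest hL]
      simp only [List.length_cons, List.length_map, decide_eq_true_eq]
      exact Nat.succ_lt_succ hrun
    have hhead : pvMem ((k, c) :: rest) k
        = c :: (rest.takeWhile (fun q => q.1 == k)).map (fun q => q.2) := pvMemHead k c rest hL
    refine ((ihx.cons _).trans ?_).trans
      ((hTperm.filter (fun t => decide (1 < (pvMem ((k, c) :: rest) t).length))).map
        (fun t => pvMem ((k, c) :: rest) t)).symm
    rw [List.filter_cons, if_pos hPBk, List.map_cons, ← hfiltmap, hhead]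
  | case3 k c rest run rest' hrun ih =>
    have erun : run = rest.takeWhile (fun q => q.1 == k) := rfl
    have hrest'pw : (rest.dropWhile (fun q => q.1 == k)).Pairwise pvR :=
      List.Pairwise.sublist (List.dropWhile_sublist _) ((List.pairwise_cons.mp hL).2)
    have hkT : k ∈ T := (hmem k).mpr (by simp)
    have hT' : (T.erase k).Nodup := hT.erase k
    have hmem' : ∀ t, t ∈ T.erase k ↔ t ∈ (rest.dropWhile (fun q => q.1 == k)).map (fun q => q.1) := by
      intro t
      rw [hT.mem_erase_iff]
      constructor
      · intro ⟨hne, ht⟩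
        rcases (pvKeysSplit k t c rest hL).mp ((hmem t).mp ht) with h1 | h1
        · exact absurd h1 hne
        · exact h1
      · intro ht
        obtain ⟨q, hq, hqe⟩ := List.mem_map.mp ht
        have hlt : k < t := hqe ▸ pvRestKeys k c rest hL q hq
        exact ⟨fun he => absurd (he ▸ hlt) (lt_irrefl k),
          (hmem t).mpr ((pvKeysSplit k t c rest hL).mpr (Or.inr ht))⟩
    have hTperm : T.Perm (k :: T.erase k) := List.perm_cons_erase hkT
    have hfiltmap :
        ((T.erase k).filter (fun t => decide (1 < (pvMem ((k, c) :: rest) t).length))).map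
            (fun t => pvMem ((k, c) :: rest) t)
          = ((T.erase k).filter
              (fun t => decide (1 < (pvMem (rest.dropWhile (fun q => q.1 == k)) t).length))).map
            (fun t => pvMem (rest.dropWhile (fun q => q.1 == k)) t) := by
      rw [List.filter_congr (fun t ht => by
        rw [pvMemNe k t c rest hL (hT.mem_erase_iff.mp ht).1])]
      apply List.map_congr_left
      intro t ht
      exact pvMemNe k t c rest hL (hT.mem_erase_iff.mp (List.mem_filter.mp ht).1).1
    have ihx := ih hrest'pw (T.erase k) hT' hmem'
    rw [erun] at hrun
    rw [pvCollectRuns_cons, if_neg hrun]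
    have hPBk : (decide (1 < (pvMem ((k, c) :: rest) k).length)) = false := by
      rw [pvMemHead k c rest hL]
      simp only [List.length_cons, List.length_map, decide_eq_false_iff_not]
      intro hcon
      exact hrun (Nat.lt_of_succ_lt_succ hcon)
    refine (ihx.trans ?_).trans
      ((hTperm.filter (fun t => decide (1 < (pvMem ((k, c) :: rest) t).length))).map
        (fun t => pvMem ((k, c) :: rest) t)).symm
    rw [List.filter_cons, if_neg (by rw [hPBk]; simp), ← hfiltmap]

theorem pvSorted_eq_of_perm (xs ys : List (List String)) (h : xs.Perm ys) :
    PySem.List.sorted xs (fun x => x) false = PySem.List.sorted ys (fun x => x) false := by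
  conv_lhs => rw [pvBridgeLO _ rfl]
  conv_rhs => rw [pvBridgeLO _ rfl]
  exact PySem.List.sorted_eq_sorted_of_perm _ _ _ (fun a b h => h) h

theorem sharedAccounts_eq (cas : List (String × String)) :
    sharedAccounts cas = sharedAccounts_alt cas := by
  unfold sharedAccounts sharedAccounts_alt
  set m := cas.foldl (fun d p => d.modify p.1 [] (fun s => PySem.Set.add s p.2))
    (PySem.Dict.empty : PySem.Dict String (PySem.Set String)) with hm
  show PySem.List.sorted
      ((List.foldl (fun g p => pvAgAppend g p.2 p.1) [] m.items).foldl
        (fun r q => if 1 < q.2.length then r ++ [PySem.List.sorted q.2 (fun x => x) false] else r) [])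
      (fun x => x) false
    = PySem.List.sorted (pvCollectRuns (PySem.List.sorted2
        (m.items.map (fun p => (PySem.List.sorted p.2 (fun x => x) false, p.1)))
        (fun q => q.1) (fun q => q.2) false)) (fun x => x) false
  set P := m.items.map (fun p => (pvSig p.2, p.1)) with hP
  have hpairs : m.items.map (fun p => (PySem.List.sorted p.2 (fun x => x) false, p.1)) = P := rfl
  rw [hpairs]
  set spairs := PySem.List.sorted2 P (fun q => q.1) (fun q => q.2) false with hsp
  have hvals : ∀ p ∈ m.items, p.2.Nodup := pvItems_values_nodup cas
  rw [pvResultA m.items hvals]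
  set K := PySem.Set.ofList (P.map (fun q => q.1)) with hK
  have hKnd : K.Nodup := PySem.Set.nodup_ofList _
  have hpermsp : spairs.Perm P := PySem.List.sorted2_perm P _ _ false
  have hpw : spairs.Pairwise pvR := pvSpairs_pairwise P
  have hmemK : ∀ t, t ∈ K ↔ t ∈ spairs.map (fun q => q.1) := by
    intro t
    rw [hK, PySem.Set.mem_ofList]
    exact ((hpermsp.map (fun q => q.1)).mem_iff).symm
  have hmemperm : ∀ t, (pvMem spairs t).Perm (pvMem P t) := by
    intro t
    exact (hpermsp.filter (fun q => q.1 == t)).map (fun q => q.2)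
  have hmemeq : ∀ t, pvMem spairs t = pvSig (pvMem P t) := by
    intro t
    unfold pvSig
    rw [pvBridgeLO _ rfl]
    refine (PySem.List.sorted_id_eq_of_perm_of_pairwise _ _ (hmemperm t) ?_).symm
    unfold pvMem
    rw [List.pairwise_map]
    refine List.Pairwise.imp_of_mem ?_ ((hpw.filter (fun q => q.1 == t)))
    intro a b ha hb hr
    have hat : a.1 = t := eq_of_beq (List.mem_filter.mp ha).2
    have hbt : b.1 = t := eq_of_beq (List.mem_filter.mp hb).2
    rcases hr with h | ⟨_, h⟩
    · rw [hat, hbt] at h; exact absurd h (lt_irrefl t)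
    · exact h
  have hCR := pvCollectRuns_perm spairs hpw K hKnd hmemK
  have hsame : ((K.filter (fun t => decide (1 < (pvMem spairs t).length))).map (fun t => pvMem spairs t))
      = ((K.filter (fun t => decide (1 < (pvMem P t).length))).map (fun t => pvSig (pvMem P t))) := by
    rw [List.filter_congr (fun t _ => by rw [(hmemperm t).length_eq])]
    exact List.map_congr_left (fun t _ => hmemeq t)
  rw [hsame] at hCR
  exact pvSorted_eq_of_perm _ _ hCR.symm

-- ===== VERDICT (by name: the statement is the Claim_ definition above) =====
theorem sharedAccounts_spec : Claim_equal_sharedAccounts := by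
  intro customerAccounts _
  show sharedAccounts customerAccounts = sharedAccounts_alt customerAccounts
  exact sharedAccounts_eq customerAccounts
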